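-- pv_equiv track=rewrite | github.com/Zhannyhong/cdc-bot | src/website_handler.py | check_if_same_sessions
-- ===== SOURCE A (Python) =====
-- from typing import Dict, Union
--
-- def check_if_same_sessions(session0: Dict, session1: Dict):
--     for date_str, time_slots in session0.items():
--         if date_str not in session1:
--             return True
--
--         for time_slot in time_slots:
--             if time_slot not in session1[date_str]:
--                 return True
--
--     for date_str, time_slots in session1.items():
--         if date_str not in session0:
--             return True
--
--         for time_slot in time_slots:
--             if time_slot not in session0[date_str]:
--                 return True
--
--     return False
-- ===== SOURCE B (Python) =====
-- def check_if_same_sessions(session0, session1):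
--     norm0 = {date: set(slots) for date, slots in session0.items()}
--     norm1 = {date: set(slots) for date, slots in session1.items()}
--     return norm0 != norm1
-- ===== Notes on version B (the rewrite author's own statement) =====
-- stated objective: simpler
-- what changed: Replaces A's two directional early-returning nested membership scans with canonicalising each session to a date->set(time_slots) dict and one dict inequality.
import Mathlib
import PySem

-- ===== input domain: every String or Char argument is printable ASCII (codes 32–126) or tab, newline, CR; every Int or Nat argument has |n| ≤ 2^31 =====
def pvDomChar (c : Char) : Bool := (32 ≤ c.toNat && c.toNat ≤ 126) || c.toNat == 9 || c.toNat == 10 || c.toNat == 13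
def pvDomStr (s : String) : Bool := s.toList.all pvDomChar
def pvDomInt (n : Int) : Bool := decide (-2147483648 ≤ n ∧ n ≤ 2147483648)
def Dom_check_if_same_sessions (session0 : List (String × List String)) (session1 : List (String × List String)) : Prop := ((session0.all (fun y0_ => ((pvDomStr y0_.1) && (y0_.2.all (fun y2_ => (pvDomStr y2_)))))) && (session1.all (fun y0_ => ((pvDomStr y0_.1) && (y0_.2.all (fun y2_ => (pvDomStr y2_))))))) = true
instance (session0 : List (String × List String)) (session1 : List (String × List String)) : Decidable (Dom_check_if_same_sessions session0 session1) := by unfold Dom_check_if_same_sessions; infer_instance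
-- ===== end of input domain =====

-- B canonicalises each session to date -> set(time_slots) and compares once (simpler than A's two directional nested scans).

-- ===== PORT A =====
-- one directional scan of A: 'for date_str, time_slots in src.items(): …' against tgt
def pvOneWay (src : List (String × List String)) (tgt : List (String × List String)) : Bool :=
  src.any (fun p =>
    match (PySem.Dict.mk tgt).get? p.1 with
    | none => true                                   -- 'if date_str not in tgt: return True'
    | some ys => p.2.any (fun t => !(ys.contains t)))  -- 'if time_slot not in tgt[date_str]: return True'

def check_if_same_sessions (session0 : List (String × List String)) (session1 : List (String × List String)) : Bool :=
  pvOneWay session0 session1 || pvOneWay session1 session0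

-- ===== PORT B =====
-- '{date: set(slots) for date, slots in session.items()}'
def pvNorm (s : List (String × List String)) : PySem.Dict String (PySem.Set String) :=
  s.foldl (fun d p => d.insert p.1 (PySem.Set.ofList p.2)) PySem.Dict.empty

-- Python's 'd0 == d1' on dicts with set values: same size, every key of d0 maps in d1 to an equal set
def pvDictSetEq (d0 : PySem.Dict String (PySem.Set String)) (d1 : PySem.Dict String (PySem.Set String)) : Bool :=
  (d0.size == d1.size) &&
  d0.items.all (fun p =>
    match d1.get? p.1 with
    | some t => PySem.Set.equal p.2 t
    | none => false)

def check_if_same_sessions_alt (session0 : List (String × List String)) (session1 : List (String × List String)) : Bool :=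
  !(pvDictSetEq (pvNorm session0) (pvNorm session1))

-- ===== PRECONDITION & SPEC =====
-- Pre_ excludes only association lists with duplicate date keys: a Python dict cannot contain a
-- duplicate key, so such lists do not encode any input the Python functions can receive.
def Pre_check_if_same_sessions (session0 : List (String × List String)) (session1 : List (String × List String)) : Prop :=
  (session0.map Prod.fst).Nodup ∧ (session1.map Prod.fst).Nodup
instance (session0 : List (String × List String)) (session1 : List (String × List String)) : Decidable (Pre_check_if_same_sessions session0 session1) := by unfold Pre_check_if_same_sessions; infer_instance

def pvWitness_check_if_same_sessions : (List (String × List String)) × (List (String × List String)) :=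
  ([("2024-01-01", ["08:00", "09:00"])], [("2024-01-01", ["09:00", "08:00", "09:00"])])

def Spec_check_if_same_sessions (session0 : List (String × List String)) (session1 : List (String × List String)) (out : Bool) : Prop := out = check_if_same_sessions_alt session0 session1
instance (session0 : List (String × List String)) (session1 : List (String × List String)) (out : Bool) : Decidable (Spec_check_if_same_sessions session0 session1 out) := by unfold Spec_check_if_same_sessions; infer_instance

-- ===== CLAIM (what is proved, stated in full; the proofs are below) =====
def Claim_equal_check_if_same_sessions : Prop := ∀ (session0 : List (String × List String)) (session1 : List (String × List String)), Dom_check_if_same_sessions session0 session1 → Pre_check_if_same_sessions session0 session1 → Spec_check_if_same_sessions session0 session1 (check_if_same_sessions session0 session1)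

-- ===== LEMMAS AND PROOFS =====

lemma oneWay_eq_false (src tgt : List (String × List String)) :
    pvOneWay src tgt = false ↔
      ∀ p ∈ src, ∃ ys, (PySem.Dict.mk tgt).get? p.1 = some ys ∧ ∀ t ∈ p.2, t ∈ ys := by
  simp only [pvOneWay, List.any_eq_false]
  constructor
  · intro h p hp
    have hx := h p hp
    cases hg : (PySem.Dict.mk tgt).get? p.1 with
    | none => rw [hg] at hx; simp at hx
    | some ys =>
      refine ⟨ys, rfl, ?_⟩
      intro t ht
      rw [hg] at hx
      by_contra htm
      apply hx
      simp only [List.any_eq_true]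
      exact ⟨t, ht, by simpa using htm⟩
  · intro h p hp
    obtain ⟨ys, hg, hsub⟩ := h p hp
    rw [hg]
    intro hcontra
    simp only [List.any_eq_true] at hcontra
    obtain ⟨t, ht, hbad⟩ := hcontra
    have : t ∉ ys := by simpa using hbad
    exact this (hsub t ht)

lemma get?_mk_iff (tgt : List (String × List String)) (hn : (tgt.map Prod.fst).Nodup)
    (k : String) (ys : List String) :
    (PySem.Dict.mk tgt).get? k = some ys ↔ (k, ys) ∈ tgt := by
  have hk : (PySem.Dict.mk tgt).keys.Nodup := by simpa [PySem.Dict.keys] using hn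
  have := PySem.Dict.get?_eq_some_iff_mem_items (d := PySem.Dict.mk tgt) (k := k) (v := ys) hk
  simpa [PySem.Dict.items] using this

lemma norm_items (s : List (String × List String)) (hn : (s.map Prod.fst).Nodup) :
    (pvNorm s).items = s.map (fun p => (p.1, PySem.Set.ofList p.2)) := by
  have := PySem.Dict.items_foldl_insert_fresh (l := s) (k := Prod.fst)
    (v := fun p => PySem.Set.ofList p.2) (d := PySem.Dict.empty)
    (by intro a _; simp [PySem.Dict.contains_empty]) hn
  simpa [pvNorm] using this

lemma val_unique (s : List (String × List String)) (hn : (s.map Prod.fst).Nodup)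
    {k : String} {a b : List String} (ha : (k, a) ∈ s) (hb : (k, b) ∈ s) : a = b := by
  have h1 := (get?_mk_iff s hn k b).2 hb
  have h2 := (get?_mk_iff s hn k a).2 ha
  rw [h1] at h2; exact (Option.some.inj h2).symm

lemma norm_keys_nodup (s : List (String × List String)) (hn : (s.map Prod.fst).Nodup) :
    (pvNorm s).keys.Nodup := by
  have : (pvNorm s).keys = s.map Prod.fst := by
    simp [PySem.Dict.keys, norm_items s hn, Function.comp]
  rw [this]; exact hn

lemma dictSetEq_true_iff (s0 s1 : List (String × List String))
    (h0 : (s0.map Prod.fst).Nodup) (h1 : (s1.map Prod.fst).Nodup) :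
    pvDictSetEq (pvNorm s0) (pvNorm s1) = true ↔
      s0.length = s1.length ∧
        ∀ p ∈ s0, ∃ ys, (p.1, ys) ∈ s1 ∧ (∀ t, t ∈ p.2 ↔ t ∈ ys) := by
  have hi0 := norm_items s0 h0
  have hi1 := norm_items s1 h1
  have hk1 := norm_keys_nodup s1 h1
  have hsz : ((pvNorm s0).size == (pvNorm s1).size) = true ↔ s0.length = s1.length := by
    simp [PySem.Dict.size, hi0, hi1]
  have hget : ∀ (k : String) (T : PySem.Set String),
      (pvNorm s1).get? k = some T ↔ ∃ q ∈ s1, k = q.1 ∧ T = PySem.Set.ofList q.2 := by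
    intro k T
    rw [PySem.Dict.get?_eq_some_iff_mem_items (pvNorm s1) k T hk1, hi1]
    simp only [List.mem_map, Prod.mk.injEq]
    constructor
    · rintro ⟨q, hq, hk, hT⟩; exact ⟨q, hq, hk.symm, hT.symm⟩
    · rintro ⟨q, hq, hk, hT⟩; exact ⟨q, hq, hk.symm, hT.symm⟩
  unfold pvDictSetEq
  rw [Bool.and_eq_true, hsz, List.all_eq_true]
  constructor
  · rintro ⟨hlen, hall⟩
    refine ⟨hlen, ?_⟩
    intro p hp
    have hmem : (p.1, PySem.Set.ofList p.2) ∈ (pvNorm s0).items := by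
      rw [hi0]; exact List.mem_map.2 ⟨p, hp, rfl⟩
    have hx := hall _ hmem
    cases hg : (pvNorm s1).get? p.1 with
    | none => rw [hg] at hx; simp at hx
    | some T =>
      rw [hg] at hx
      obtain ⟨q, hq, hk, hT⟩ := (hget _ _).1 hg
      refine ⟨q.2, by rw [hk]; exact hq, ?_⟩
      intro t
      have := (PySem.Set.equal_iff (PySem.Set.ofList p.2) T).1 hx t
      rw [hT] at this
      simpa [PySem.Set.mem_ofList] using this
  · rintro ⟨hlen, hall⟩
    refine ⟨hlen, ?_⟩
    intro r hr
    rw [hi0] at hr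
    obtain ⟨p, hp, rfl⟩ := List.mem_map.1 hr
    obtain ⟨ys, hys, hiff⟩ := hall p hp
    have hg : (pvNorm s1).get? p.1 = some (PySem.Set.ofList ys) :=
      (hget _ _).2 ⟨(p.1, ys), hys, rfl, rfl⟩
    rw [hg]
    rw [PySem.Set.equal_iff]
    intro x
    simpa [PySem.Set.mem_ofList] using hiff x

lemma main_iff (s0 s1 : List (String × List String))
    (h0 : (s0.map Prod.fst).Nodup) (h1 : (s1.map Prod.fst).Nodup) :
    (pvOneWay s0 s1 = false ∧ pvOneWay s1 s0 = false) ↔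
      pvDictSetEq (pvNorm s0) (pvNorm s1) = true := by
  rw [oneWay_eq_false, oneWay_eq_false, dictSetEq_true_iff s0 s1 h0 h1]
  constructor
  · rintro ⟨F, G⟩
    have F' : ∀ p ∈ s0, ∃ ys, (p.1, ys) ∈ s1 ∧ ∀ t ∈ p.2, t ∈ ys := by
      intro p hp; obtain ⟨ys, hg, hs⟩ := F p hp
      exact ⟨ys, (get?_mk_iff s1 h1 _ _).1 hg, hs⟩
    have G' : ∀ q ∈ s1, ∃ ts, (q.1, ts) ∈ s0 ∧ ∀ t ∈ q.2, t ∈ ts := by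
      intro q hq; obtain ⟨ts, hg, hs⟩ := G q hq
      exact ⟨ts, (get?_mk_iff s0 h0 _ _).1 hg, hs⟩
    have hsub01 : s0.map Prod.fst ⊆ s1.map Prod.fst := by
      intro k hk; obtain ⟨p, hp, rfl⟩ := List.mem_map.1 hk
      obtain ⟨ys, hmem, _⟩ := F' p hp
      exact List.mem_map.2 ⟨(p.1, ys), hmem, rfl⟩
    have hsub10 : s1.map Prod.fst ⊆ s0.map Prod.fst := by
      intro k hk; obtain ⟨q, hq, rfl⟩ := List.mem_map.1 hk
      obtain ⟨ts, hmem, _⟩ := G' q hq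
      exact List.mem_map.2 ⟨(q.1, ts), hmem, rfl⟩
    have hperm : (s0.map Prod.fst).Perm (s1.map Prod.fst) :=
      (List.perm_ext_iff_of_nodup h0 h1).2 (fun a => ⟨fun h => hsub01 h, fun h => hsub10 h⟩)
    have hlen : s0.length = s1.length := by simpa using hperm.length_eq
    refine ⟨hlen, ?_⟩
    intro p hp
    obtain ⟨ys, hmem, hs⟩ := F' p hp
    obtain ⟨ts, hts, hs2⟩ := G' (p.1, ys) hmem
    have hts2 : ts = p.2 := val_unique s0 h0 hts (by simpa using hp)
    refine ⟨ys, hmem, fun t => ⟨hs t, fun htys => ?_⟩⟩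
    have := hs2 t htys
    rwa [hts2] at this
  · rintro ⟨hlen, H⟩
    constructor
    · intro p hp
      obtain ⟨ys, hmem, hiff⟩ := H p hp
      exact ⟨ys, (get?_mk_iff s1 h1 _ _).2 hmem, fun t ht => (hiff t).1 ht⟩
    · intro q hq
      have hsub01 : s0.map Prod.fst ⊆ s1.map Prod.fst := by
        intro k hk; obtain ⟨p, hp, rfl⟩ := List.mem_map.1 hk
        obtain ⟨ys, hmem, _⟩ := H p hp
        exact List.mem_map.2 ⟨(p.1, ys), hmem, rfl⟩
      have hsp : (s0.map Prod.fst).Subperm (s1.map Prod.fst) := h0.subperm hsub01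
      have hperm : (s0.map Prod.fst).Perm (s1.map Prod.fst) :=
        hsp.perm_of_length_le (by simpa using hlen.ge)
      have hk : q.1 ∈ s0.map Prod.fst :=
        hperm.mem_iff.2 (List.mem_map.2 ⟨q, hq, rfl⟩)
      obtain ⟨p, hp, hpk⟩ := List.mem_map.1 hk
      obtain ⟨ys, hmem, hiff⟩ := H p hp
      have hys : ys = q.2 := val_unique s1 h1 (by rwa [hpk] at hmem) (by simpa using hq)
      refine ⟨p.2, (get?_mk_iff s0 h0 _ _).2 ?_, ?_⟩
      · rw [← hpk]; simpa using hp
      · intro t ht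
        exact (hiff t).2 (by rw [hys]; exact ht)


-- ===== VERDICT (by name: the statement is the Claim_ definition above) =====
theorem check_if_same_sessions_spec : Claim_equal_check_if_same_sessions := by
  intro s0 s1 _hdom hpre
  obtain ⟨h0, h1⟩ := hpre
  unfold Spec_check_if_same_sessions check_if_same_sessions check_if_same_sessions_alt
  have h := main_iff s0 s1 h0 h1
  cases ha : pvOneWay s0 s1 <;> cases hb : pvOneWay s1 s0 <;>
    cases hc : pvDictSetEq (pvNorm s0) (pvNorm s1) <;> simp_all
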